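-- pv_equiv track=rewrite | github.com/zenzi-deluxe/CAdViSE | plot_AStream_results.py | fetch_videos_codecs
-- ===== SOURCE A (Python) =====
-- def fetch_videos_codecs(jsons):
--     codec_switches = dict()
--     for video in jsons:
--         codec_switches[video] = dict()
--         for abr in jsons[video]:
--             codec_switches[video][abr] = dict()
--             for file in jsons[video][abr]:
--                 temp_codec = None
--                 temp_switch = 0
--                 for segment_name in jsons[video][abr][file]:
--                     if "segment_" not in segment_name or segment_name[-4:] == ".mp4":  # Initialization segment
--                         continue
--                     if temp_codec is None:
--                         temp_codec = jsons[video][abr][file][segment_name]["codec"]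
--                         continue
--                     if jsons[video][abr][file][segment_name]["codec"] != temp_codec:
--                         temp_switch += 1
--                         temp_codec = jsons[video][abr][file][segment_name]["codec"]
--                 codec_switches[video][abr][file] = temp_switch
--     return codec_switches
-- ===== SOURCE B (Python) =====
-- def fetch_videos_codecs(jsons):
--     # Run-length view, in two staged passes: first build a nested structure of
--     # per-file "run head" lists (the codec sequence with consecutive duplicates
--     # collapsed), then map each run list to its switch count max(len-1, 0).
--     runs = {
--         video: {
--             abr: {file: _run_heads(segments) for file, segments in files.items()}
--             for abr, files in abrs.items()
--         }
--         for video, abrs in jsons.items()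
--     }
--     return {
--         video: {
--             abr: {file: max(len(heads) - 1, 0) for file, heads in files.items()}
--             for abr, files in abrs.items()
--         }
--         for video, abrs in runs.items()
--     }
--
--
-- def _run_heads(segments):
--     heads = []
--     for name, seg in segments.items():
--         if "segment_" not in name or name.endswith(".mp4"):  # initialization segment
--             continue
--         codec = seg["codec"]
--         if not heads or heads[-1] != codec:
--             heads.append(codec)
--     return heads
-- ===== Notes on version B (the rewrite author's own statement) =====
-- stated objective: alternative
-- what changed: B recasts switch counting as run counting in two staged passes: pass one builds a nested structure of per-file run-head lists (the codec sequence with consecutive duplicates collapsed into a list), pass two maps each run list to max(len-1,0); A instead streams a sentinel temp_codec with a running switch counter while mutating nested dicts in one pass.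
import Mathlib
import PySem

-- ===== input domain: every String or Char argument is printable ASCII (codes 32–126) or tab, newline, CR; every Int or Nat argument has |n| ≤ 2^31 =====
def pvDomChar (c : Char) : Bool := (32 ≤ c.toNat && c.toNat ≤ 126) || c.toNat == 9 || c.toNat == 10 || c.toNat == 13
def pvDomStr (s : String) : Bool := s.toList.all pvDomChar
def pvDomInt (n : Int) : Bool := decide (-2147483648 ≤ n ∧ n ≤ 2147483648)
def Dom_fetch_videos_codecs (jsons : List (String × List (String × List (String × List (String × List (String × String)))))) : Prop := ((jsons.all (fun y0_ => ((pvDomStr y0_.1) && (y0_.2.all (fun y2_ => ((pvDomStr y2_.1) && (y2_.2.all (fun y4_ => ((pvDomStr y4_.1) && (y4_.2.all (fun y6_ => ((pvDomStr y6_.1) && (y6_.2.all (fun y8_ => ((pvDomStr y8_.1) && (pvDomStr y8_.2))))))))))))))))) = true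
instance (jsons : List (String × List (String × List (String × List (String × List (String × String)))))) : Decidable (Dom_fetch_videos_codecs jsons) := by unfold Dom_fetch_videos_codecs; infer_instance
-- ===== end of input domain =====

-- B replaces A's sentinel temp_codec/counter single pass with two staged passes: build per-file run-head lists (consecutive duplicates collapsed), then map each to max(len-1,0); same result, same cost.


-- ===== PORT A =====
-- seg["codec"]: first-match association-list lookup (Python raises KeyError when absent; Pre_ excludes that, the port's "" default is never reached inside Pre_)
def pvGetCodec (seg : List (String × String)) : String :=
  ((seg.find? (fun p => p.1 == "codec")).map Prod.snd).getD ""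

-- A's skip test: '"segment_" not in segment_name or segment_name[-4:] == ".mp4"'
def pvSkipA (name : String) : Bool :=
  !(PySem.Str.isIn "segment_" name) || (PySem.Str.slice name (some (-4)) none == ".mp4")

-- A's innermost loop: state (temp_codec, temp_switch)
def pvFileLoopA (segs : List (String × List (String × String))) : Option String × Int :=
  segs.foldl
    (fun st p =>
      if pvSkipA p.1 then st
      else
        match st.1 with
        | none => (some (pvGetCodec p.2), st.2)
        | some c => if pvGetCodec p.2 != c then (some (pvGetCodec p.2), st.2 + 1) else st)
    (none, 0)

def fetch_videos_codecs (jsons : List (String × List (String × List (String × List (String × List (String × String)))))) : List (String × List (String × List (String × Int))) :=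
  jsons.foldl
    (fun acc v =>
      acc ++ [(v.1,
        v.2.foldl
          (fun acc2 a =>
            acc2 ++ [(a.1,
              a.2.foldl (fun acc3 f => acc3 ++ [(f.1, (pvFileLoopA f.2).2)]) [])])
          [])])
    []

-- ===== PORT B =====
-- B's skip test: '"segment_" not in name or name.endswith(".mp4")'
def pvSkipB (name : String) : Bool :=
  !(PySem.Str.isIn "segment_" name) || PySem.Str.endswith name ".mp4"

-- '_run_heads': the codec sequence of the media segments with consecutive duplicates collapsed
def pvRunHeads (segs : List (String × List (String × String))) : List String :=
  segs.foldl
    (fun heads p =>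
      if pvSkipB p.1 then heads
      else
        let c := pvGetCodec p.2
        match heads.getLast? with
        | none => heads ++ [c]
        | some h => if h != c then heads ++ [c] else heads)
    []

def fetch_videos_codecs_alt (jsons : List (String × List (String × List (String × List (String × List (String × String)))))) : List (String × List (String × List (String × Int))) :=
  let runs := jsons.map (fun v =>
    (v.1, v.2.map (fun a =>
      (a.1, a.2.map (fun f => (f.1, pvRunHeads f.2))))))
  runs.map (fun v =>
    (v.1, v.2.map (fun a =>
      (a.1, a.2.map (fun f => (f.1, max ((f.2.length : Int) - 1) 0))))))

-- ===== PRECONDITION & SPEC =====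
-- Pre_ excludes exactly the inputs on which Python A raises KeyError: a media segment
-- (name containing "segment_" and not ending in ".mp4") whose dict lacks the "codec" key.
def Pre_fetch_videos_codecs (jsons : List (String × List (String × List (String × List (String × List (String × String)))))) : Prop :=
  ∀ v ∈ jsons, ∀ a ∈ v.2, ∀ f ∈ a.2, ∀ s ∈ f.2,
    (PySem.Str.isIn "segment_" s.1 && !(PySem.Str.endswith s.1 ".mp4")) = true →
      (s.2.map Prod.fst).contains "codec" = true
instance (jsons : List (String × List (String × List (String × List (String × List (String × String)))))) : Decidable (Pre_fetch_videos_codecs jsons) := by unfold Pre_fetch_videos_codecs; infer_instance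

def pvWitness_fetch_videos_codecs : (List (String × List (String × List (String × List (String × List (String × String)))))) :=
  [("video1", [("abr1", [("file1",
      [("segment_1", [("codec", "h264")]),
       ("init.mp4", []),
       ("segment_2", [("codec", "h265")])])])])]

def Spec_fetch_videos_codecs (jsons : List (String × List (String × List (String × List (String × List (String × String)))))) (out : List (String × List (String × List (String × Int)))) : Prop := out = fetch_videos_codecs_alt jsons
instance (jsons : List (String × List (String × List (String × List (String × List (String × String)))))) (out : List (String × List (String × List (String × Int)))) : Decidable (Spec_fetch_videos_codecs jsons out) := by unfold Spec_fetch_videos_codecs; infer_instance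

-- ===== CLAIM (what is proved, stated in full; the proofs are below) =====
def Claim_equal_fetch_videos_codecs : Prop := ∀ (jsons : List (String × List (String × List (String × List (String × List (String × String)))))), Dom_fetch_videos_codecs jsons → Pre_fetch_videos_codecs jsons → Spec_fetch_videos_codecs jsons (fetch_videos_codecs jsons)

-- ===== LEMMAS AND PROOFS =====

theorem pv_drop_eq_iff_suffix (cs : List Char) :
    (cs.drop (cs.length - 4) = ".mp4".toList) ↔ ".mp4".toList <:+ cs := by
  constructor
  · intro h; rw [← h]; exact List.drop_suffix _ _
  · intro h
    have := List.suffix_iff_eq_drop.mp h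
    simpa using this.symm

-- A's tail test 'name[-4:] == ".mp4"' coincides with B's 'name.endswith(".mp4")'
theorem pv_tail_eq_endswith (name : String) :
    ((PySem.Str.slice name (some (-4)) none == ".mp4") : Bool) = PySem.Str.endswith name ".mp4" := by
  have hs : (PySem.Str.slice name (some (-4)) none).toList = name.toList.drop (name.toList.length - 4) := by
    simp [PySem.List.slice]
  have key : (PySem.Str.slice name (some (-4)) none = ".mp4") ↔ ".mp4".toList <:+ name.toList := by
    rw [← pv_drop_eq_iff_suffix, ← hs]
    constructor
    · intro h; rw [h]
    · intro h; exact String.toList_injective h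
  by_cases h : ".mp4".toList <:+ name.toList
  · have h1 : PySem.Str.endswith name ".mp4" = true := by
      simp [PySem.Str.endswith_eq, PySem.Chars.endswith_iff]; exact h
    rw [h1]; simpa using key.2 h
  · have h1 : PySem.Str.endswith name ".mp4" = false := by
      simp only [PySem.Str.endswith_eq, Bool.eq_false_iff]
      intro hc; exact h ((PySem.Chars.endswith_iff _ _).mp hc)
    rw [h1]
    simp only [beq_eq_false_iff_ne, ne_eq]
    intro hc; exact h (key.1 hc)

theorem pv_skipA_eq_skipB (name : String) : pvSkipA name = pvSkipB name := by
  unfold pvSkipA pvSkipB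
  rw [pv_tail_eq_endswith]

-- A's loop state read off from B's run-head list
def pvStOf (heads : List String) : Option String × Int :=
  match heads.getLast? with
  | none => (none, 0)
  | some h => (some h, (heads.length : Int) - 1)

-- named copies of the two loop bodies (definitionally equal to the lambdas in the ports)
def pvStepA (st : Option String × Int) (p : String × List (String × String)) : Option String × Int :=
  if pvSkipA p.1 then st
  else
    match st.1 with
    | none => (some (pvGetCodec p.2), st.2)
    | some c => if pvGetCodec p.2 != c then (some (pvGetCodec p.2), st.2 + 1) else st

def pvStepB (heads : List String) (p : String × List (String × String)) : List String :=
  if pvSkipB p.1 then heads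
  else
    let c := pvGetCodec p.2
    match heads.getLast? with
    | none => heads ++ [c]
    | some h => if h != c then heads ++ [c] else heads

-- one step of A's loop, read through pvStOf, is one step of B's run-head building
theorem pv_step_comm (heads : List String) (p : String × List (String × String)) :
    pvStepA (pvStOf heads) p = pvStOf (pvStepB heads p) := by
  unfold pvStepA pvStepB
  rw [pv_skipA_eq_skipB]
  by_cases hskip : pvSkipB p.1 = true
  · rw [if_pos hskip, if_pos hskip]
  · rw [if_neg hskip, if_neg hskip]
    cases hlast : heads.getLast? with
    | none =>
      have hnil : heads = [] := List.getLast?_eq_none_iff.mp hlast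
      subst hnil
      simp [pvStOf]
    | some h =>
      have hst : pvStOf heads = (some h, (heads.length : Int) - 1) := by
        unfold pvStOf; rw [hlast]
      rw [hst]
      by_cases hc : (pvGetCodec p.2 != h) = true
      · have hc' : (h != pvGetCodec p.2) = true := by
          simp only [bne_iff_ne, ne_eq] at hc ⊢; exact fun e => hc e.symm
        simp only [hc, hc', if_true]
        unfold pvStOf
        simp only [List.getLast?_append, List.getLast?_singleton, Option.some_or,
          List.length_append, List.length_cons, List.length_nil]
        refine Prod.ext rfl ?_
        push_cast; ring
      · have hc' : (h != pvGetCodec p.2) = false := by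
          simp only [bne_iff_ne, ne_eq, not_not] at hc
          simp [hc]
        simp only [hc, hc', if_false, Bool.false_eq_true, hst]

theorem pv_fold_comm (segs : List (String × List (String × String))) (heads : List String) :
    segs.foldl pvStepA (pvStOf heads) = pvStOf (segs.foldl pvStepB heads) := by
  induction segs generalizing heads with
  | nil => rfl
  | cons p rest ih =>
    simp only [List.foldl_cons, pv_step_comm]
    exact ih (pvStepB heads p)

theorem pv_inner_eq (segs : List (String × List (String × String))) :
    (pvFileLoopA segs).2 = max (((pvRunHeads segs).length : Int) - 1) 0 := by
  have ha : pvFileLoopA segs = segs.foldl pvStepA (pvStOf []) := rfl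
  have hb : pvRunHeads segs = segs.foldl pvStepB [] := rfl
  rw [ha, hb, pv_fold_comm]
  generalize List.foldl pvStepB [] segs = heads
  cases hlast : heads.getLast? with
  | none =>
    have hnil : heads = [] := List.getLast?_eq_none_iff.mp hlast
    subst hnil
    simp [pvStOf]
  | some h =>
    have hne : heads ≠ [] := by intro e; subst e; simp at hlast
    have hlen : 1 ≤ (heads.length : Int) := by
      have := List.length_pos_iff.mpr hne
      omega
    unfold pvStOf
    rw [hlast]
    simp only
    omega

-- ===== VERDICT (by name: the statement is the Claim_ definition above) =====
theorem fetch_videos_codecs_spec : Claim_equal_fetch_videos_codecs := by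
  intro jsons _ _
  unfold Spec_fetch_videos_codecs fetch_videos_codecs fetch_videos_codecs_alt
  simp only [PySem.List.foldl_append_singleton_eq_map, List.nil_append, List.map_map,
    Function.comp_def, pv_inner_eq]
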